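-- pv_equiv track=rewrite | github.com/jxchok/MCC-2024 | explodingarrow.py | find_min_x
-- ===== SOURCE A (Python) =====
-- def can_destroy_all_targets(n, m, k, x, target_hp):
--     remaining_hp = target_hp.copy()
--     arrows_used = 0
--
--     i = 0
--     while i < n and arrows_used < k:
--         if remaining_hp[i] <= 0:
--             i += 1
--             continue
--
--         arrows_used += 1
--
--         for j in range(i, n):
--             damage = max(0, m * x - (j - i) * (j - i))
--             remaining_hp[j] -= damage
--
--         if remaining_hp[i] > 0:
--             i -= 1
--         i += 1
--
--     return all(hp <= 0 for hp in remaining_hp)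
--
-- def find_min_x(n, m, k, target_hp):
--     left = 0
--     right = (max(target_hp) // m + 1) * 2
--
--     result = -1
--     while left <= right:
--         mid = (left + right) // 2
--         if can_destroy_all_targets(n, m, k, mid, target_hp):
--             result = mid
--             right = mid - 1
--         else:
--             left = mid + 1
--
--     return result if result > 0 else 1
-- ===== SOURCE B (Python) =====
-- def find_min_x(n, m, k, target_hp):
--     size = len(target_hp)
--
--     def feasible(x):
--         # lazy-damage check: record each volley as (position, arrow count) and
--         # evaluate accumulated splash damage per target on the fly
--         d0 = m * x
--         shots = []
--         used = 0
--         for j in range(size):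
--             hp = target_hp[j]
--             if j < n:
--                 for p, a in shots:
--                     hp -= a * max(0, d0 - (j - p) * (j - p))
--             if hp <= 0:
--                 continue
--             if j >= n or d0 <= 0:
--                 return False
--             need = -(-hp // d0)
--             if used + need > k:
--                 return False
--             shots.append((j, need))
--             used += need
--         return True
--
--     left = 0
--     right = (max(target_hp) // m + 1) * 2
--     result = -1
--     while left <= right:
--         mid = (left + right) // 2
--         if feasible(mid):
--             result = mid
--             right = mid - 1
--         else:
--             left = mid + 1
--     return result if result > 0 else 1
-- ===== Notes on version B (the rewrite author's own statement) =====
-- stated objective: alternative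
-- what changed: B drops A's mutable remaining-hp array and one-arrow-at-a-time simulation: it sweeps the targets once, keeps a list of fired volleys (position, arrow count computed by ceiling division), and evaluates each target's accumulated splash damage lazily from that record; the binary search over x is kept.
import Mathlib
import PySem

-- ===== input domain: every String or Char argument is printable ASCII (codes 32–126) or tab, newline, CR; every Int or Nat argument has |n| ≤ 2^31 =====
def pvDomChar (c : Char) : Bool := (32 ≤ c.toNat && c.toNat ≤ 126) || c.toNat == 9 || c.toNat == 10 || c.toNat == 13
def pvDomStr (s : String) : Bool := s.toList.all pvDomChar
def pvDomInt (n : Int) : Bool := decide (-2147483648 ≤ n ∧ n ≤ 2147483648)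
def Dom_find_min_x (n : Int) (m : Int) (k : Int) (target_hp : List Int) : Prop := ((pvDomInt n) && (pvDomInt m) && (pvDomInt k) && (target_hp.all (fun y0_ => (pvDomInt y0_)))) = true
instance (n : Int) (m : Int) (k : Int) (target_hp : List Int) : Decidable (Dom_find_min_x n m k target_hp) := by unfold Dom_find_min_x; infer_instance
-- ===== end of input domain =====

-- B replaces A's mutable remaining-hp array and one-arrow-at-a-time simulation by a single
-- sweep that records fired volleys (position, arrow count by ceiling division) and evaluates
-- each target's accumulated splash damage lazily from that record (objective: alternative).

-- ===== PORT A =====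
-- inner 'for j in range(i, n): remaining_hp[j] -= max(0, m*x - (j-i)*(j-i))'
def pvDamageA (m : Int) (x : Int) (i : Int) (n : Int) (rem : List Int) : List Int :=
  (PySem.List.pyRange i n 1).foldl
    (fun r j => PySem.List.pySetD r j (PySem.List.pyGetD r j 0 - max 0 (m * x - (j - i) * (j - i)))) rem

-- the 'while i < n and arrows_used < k' loop of can_destroy_all_targets
def pvLoopA (n : Int) (m : Int) (k : Int) (x : Int) (rem : List Int) (used : Int) (i : Int) : List Int :=
  if h : i < n ∧ used < k then
    if PySem.List.pyGetD rem i 0 ≤ 0 then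
      pvLoopA n m k x rem used (i + 1)
    else
      let used' := used + 1
      let rem' := pvDamageA m x i n rem
      let i1 := if PySem.List.pyGetD rem' i 0 > 0 then i - 1 else i
      pvLoopA n m k x rem' used' (i1 + 1)
  else rem
termination_by ((n - i) + (k - used)).toNat
decreasing_by
  · omega
  · split <;> omega

def pvCanDestroy (n : Int) (m : Int) (k : Int) (x : Int) (target_hp : List Int) : Bool :=
  (pvLoopA n m k x target_hp 0 0).all (fun hp => decide (hp ≤ 0))

-- the 'while left <= right' binary search of find_min_x
def pvSearchA (n : Int) (m : Int) (k : Int) (target_hp : List Int) (left : Int) (right : Int) (result : Int) : Int :=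
  if hlr : left ≤ right then
    let mid := PySem.Int.floordiv (left + right) 2
    if pvCanDestroy n m k mid target_hp then
      pvSearchA n m k target_hp left (mid - 1) mid
    else
      pvSearchA n m k target_hp (mid + 1) right result
  else result
termination_by (right - left + 1).toNat
decreasing_by
  all_goals
    have := PySem.Int.floordiv_two_mid_bounds hlr
    omega

def find_min_x (n : Int) (m : Int) (k : Int) (target_hp : List Int) : Int :=
  let right := (PySem.Int.floordiv ((PySem.List.max? target_hp id).getD 0) m + 1) * 2
  let result := pvSearchA n m k target_hp 0 right (-1)
  if result > 0 then result else 1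

-- ===== PORT B =====
-- 'for p, a in shots: hp -= a * max(0, d0 - (j - p) * (j - p))'
def pvHpAt (d0 : Int) (j : Int) (base : Int) (shots : List (Int × Int)) : Int :=
  shots.foldl (fun h pa => h - pa.2 * max 0 (d0 - (j - pa.1) * (j - pa.1))) base

-- the 'for j in range(size)' sweep of B's feasible(x)
def pvShotLoop (n : Int) (d0 : Int) (k : Int) (hp : List Int) (shots : List (Int × Int)) (used : Int) (j : Nat) : Bool :=
  if hj : j < hp.length then
    let hpj := if (j : Int) < n then pvHpAt d0 (j : Int) hp[j] shots else hp[j]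
    if hpj ≤ 0 then pvShotLoop n d0 k hp shots used (j + 1)
    else if n ≤ (j : Int) ∨ d0 ≤ 0 then false
    else
      let need := -(PySem.Int.floordiv (-hpj) d0)
      if k < used + need then false
      else pvShotLoop n d0 k hp (shots ++ [((j : Int), need)]) (used + need) (j + 1)
  else true
termination_by hp.length - j

def pvFeasB (n : Int) (m : Int) (k : Int) (x : Int) (target_hp : List Int) : Bool :=
  pvShotLoop n (m * x) k target_hp [] 0 0

def pvSearchB (n : Int) (m : Int) (k : Int) (target_hp : List Int) (left : Int) (right : Int) (result : Int) : Int :=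
  if hlr : left ≤ right then
    let mid := PySem.Int.floordiv (left + right) 2
    if pvFeasB n m k mid target_hp then
      pvSearchB n m k target_hp left (mid - 1) mid
    else
      pvSearchB n m k target_hp (mid + 1) right result
  else result
termination_by (right - left + 1).toNat
decreasing_by
  all_goals
    have := PySem.Int.floordiv_two_mid_bounds hlr
    omega

def find_min_x_alt (n : Int) (m : Int) (k : Int) (target_hp : List Int) : Int :=
  let right := (PySem.Int.floordiv ((PySem.List.max? target_hp id).getD 0) m + 1) * 2
  let result := pvSearchB n m k target_hp 0 right (-1)
  if result > 0 then result else 1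

-- ===== PRECONDITION & SPEC =====
-- Pre_ admits exactly the inputs on which A returns: it excludes empty target_hp (max()
-- raises ValueError), m = 0 (ZeroDivisionError), and n > len(target_hp) whenever the binary
-- search runs a feasibility check (k > 0 and a non-negative upper bound), where that check
-- indexes past the end of the list and raises IndexError.
def Pre_find_min_x (n : Int) (m : Int) (k : Int) (target_hp : List Int) : Prop :=
  target_hp ≠ [] ∧ m ≠ 0 ∧
    (n ≤ (target_hp.length : Int) ∨ k ≤ 0 ∨
      (PySem.Int.floordiv ((PySem.List.max? target_hp id).getD 0) m + 1) * 2 < 0)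
instance (n : Int) (m : Int) (k : Int) (target_hp : List Int) : Decidable (Pre_find_min_x n m k target_hp) := by unfold Pre_find_min_x; infer_instance

def pvWitness_find_min_x : Int × Int × Int × List Int := (3, 2, 4, [7, -1, 12])

def Spec_find_min_x (n : Int) (m : Int) (k : Int) (target_hp : List Int) (out : Int) : Prop := out = find_min_x_alt n m k target_hp
instance (n : Int) (m : Int) (k : Int) (target_hp : List Int) (out : Int) : Decidable (Spec_find_min_x n m k target_hp out) := by unfold Spec_find_min_x; infer_instance

-- ===== CLAIM (what is proved, stated in full; the proofs are below) =====
def Claim_equal_find_min_x : Prop := ∀ (n : Int) (m : Int) (k : Int) (target_hp : List Int), Dom_find_min_x n m k target_hp → Pre_find_min_x n m k target_hp → Spec_find_min_x n m k target_hp (find_min_x n m k target_hp)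

-- ===== LEMMAS AND PROOFS =====

-- canonical description of one damage sweep: subtract a * max 0 (d0 - (j-i)^2) at positions i ≤ j < n
def pvDmg (d0 : Int) (a : Int) (i : Int) (n : Int) (rem : List Int) : List Int :=
  rem.mapIdx (fun j h =>
    if i ≤ (j : Int) ∧ (j : Int) < n then h - a * max 0 (d0 - ((j : Int) - i) * ((j : Int) - i)) else h)

-- proof-side batched form of A's loop: all arrows at one target applied in one sweep
def pvBatch (n : Int) (k : Int) (d0 : Int) (rem : List Int) (used : Int) (i : Int) : List Int :=
  if h : i < n ∧ used < k then
    let hi := PySem.List.pyGetD rem i 0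
    if hi ≤ 0 then
      pvBatch n k d0 rem used (i + 1)
    else
      let need := -(PySem.Int.floordiv (-hi) d0)
      let a := min need (k - used)
      let rem' := pvDmg d0 a i n rem
      if a < need then rem'
      else pvBatch n k d0 rem' (used + a) (i + 1)
  else rem
termination_by (n - i).toNat
decreasing_by
  · omega
  · omega

theorem length_pvDmg (d0 a i n : Int) (rem : List Int) : (pvDmg d0 a i n rem).length = rem.length := by
  simp [pvDmg]

theorem getElem_pvDmg (d0 a i n : Int) (rem : List Int) (j : Nat) (hj : j < rem.length) :
    (pvDmg d0 a i n rem)[j]'(by simpa [length_pvDmg] using hj) =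
      if i ≤ (j : Int) ∧ (j : Int) < n then rem[j] - a * max 0 (d0 - ((j : Int) - i) * ((j : Int) - i)) else rem[j] := by
  simp [pvDmg]

theorem getD_pvDmg (d0 a i n : Int) (rem : List Int) (j : Nat) (hj : j < rem.length) :
    (pvDmg d0 a i n rem).getD j 0 =
      if i ≤ (j : Int) ∧ (j : Int) < n then rem.getD j 0 - a * max 0 (d0 - ((j : Int) - i) * ((j : Int) - i)) else rem.getD j 0 := by
  rw [List.getD_eq_getElem _ _ (by simpa [length_pvDmg] using hj), List.getD_eq_getElem _ _ hj,
    getElem_pvDmg d0 a i n rem j hj]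

theorem pvDmg_empty (d0 a i n : Int) (rem : List Int) (h : n ≤ i) : pvDmg d0 a i n rem = rem := by
  apply List.ext_getElem (by simp [length_pvDmg])
  intro j h1 h2
  rw [getElem_pvDmg d0 a i n rem j h2, if_neg (by omega)]

theorem foldA_aux (m x i : Int) (h0 : 0 ≤ i) (c : Nat) :
    ∀ (rem : List Int), i + (c : Int) ≤ (rem.length : Int) →
      (PySem.List.pyRange i (i + (c : Int)) 1).foldl
          (fun r j => PySem.List.pySetD r j (PySem.List.pyGetD r j 0 - max 0 (m * x - (j - i) * (j - i)))) rem
        = pvDmg (m * x) 1 i (i + (c : Int)) rem := by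
  induction c with
  | zero =>
    intro rem hle
    rw [PySem.List.pyRange_one_eq_nil (by omega)]
    simp only [List.foldl_nil]
    exact (pvDmg_empty _ _ _ _ _ (by omega)).symm
  | succ c ih =>
    intro rem hle
    push_cast at hle
    have hcast : i + ((c + 1 : Nat) : Int) = (i + (c : Int)) + 1 := by omega
    rw [hcast, PySem.List.pyRange_one_succ_right (by omega), List.foldl_append,
      ih rem (by omega)]
    simp only [List.foldl_cons, List.foldl_nil]
    have htn : (i + (c : Int)).toNat < rem.length := by omega
    have htc : (((i + (c : Int)).toNat : Int)) = i + (c : Int) := Int.toNat_of_nonneg (by omega)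
    have hget : PySem.List.pyGetD (pvDmg (m * x) 1 i (i + (c : Int)) rem) (i + (c : Int)) 0
        = rem[(i + (c : Int)).toNat] := by
      rw [PySem.List.pyGetD_eq_getElem _ 0 (by omega) (by rw [length_pvDmg]; omega),
        getElem_pvDmg, if_neg (by omega)]
    rw [hget, PySem.List.pySetD_of_nonneg _ _ (by omega)]
    apply List.ext_getElem (by simp [length_pvDmg])
    intro j h1 h2
    have hj : j < rem.length := by simpa [length_pvDmg] using h2
    rw [List.getElem_set, getElem_pvDmg (m * x) 1 i (i + (c : Int) + 1) rem j hj]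
    by_cases hjt : (i + (c : Int)).toNat = j
    · rw [if_pos hjt, if_pos (by omega)]
      subst hjt
      rw [htc]
      ring_nf
    · rw [if_neg hjt, getElem_pvDmg (m * x) 1 i (i + (c : Int)) rem j hj]
      split_ifs <;> first | rfl | omega

theorem pvDamageA_eq (m x i n : Int) (rem : List Int) (h0 : 0 ≤ i)
    (hn : n ≤ (rem.length : Int)) :
    pvDamageA m x i n rem = pvDmg (m * x) 1 i n rem := by
  by_cases hni : n ≤ i
  · unfold pvDamageA
    rw [PySem.List.pyRange_one_eq_nil hni]
    simp only [List.foldl_nil]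
    exact (pvDmg_empty _ _ _ _ _ hni).symm
  · have hc : n = i + (((n - i).toNat : Nat) : Int) := by omega
    unfold pvDamageA
    rw [hc]
    exact foldA_aux m x i h0 (n - i).toNat rem (by omega)

theorem pvDmg_nonpos (d0 a i n : Int) (rem : List Int) (hd0 : d0 ≤ 0) :
    pvDmg d0 a i n rem = rem := by
  apply List.ext_getElem (by simp [length_pvDmg])
  intro j h1 h2
  rw [getElem_pvDmg d0 a i n rem j h2]
  split
  · have hsq : 0 ≤ ((j : Int) - i) * ((j : Int) - i) := mul_self_nonneg _
    have : max 0 (d0 - ((j : Int) - i) * ((j : Int) - i)) = 0 := by omega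
    rw [this]; ring
  · rfl

theorem pvDmg_comp (d0 a i n : Int) (rem : List Int) :
    pvDmg d0 (a + 1) i n rem = pvDmg d0 a i n (pvDmg d0 1 i n rem) := by
  apply List.ext_getElem (by simp [length_pvDmg])
  intro j h1 h2
  have hj : j < rem.length := by simpa [length_pvDmg] using h1
  rw [getElem_pvDmg d0 (a + 1) i n rem j hj,
    getElem_pvDmg d0 a i n (pvDmg d0 1 i n rem) j (by simpa [length_pvDmg] using hj),
    getElem_pvDmg d0 1 i n rem j hj]
  split <;> ring

theorem pvDmg_getElem_self (d0 i n : Int) (rem : List Int) (h0 : 0 ≤ i) (hin : i < n)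
    (hlen : i.toNat < rem.length) :
    (pvDmg d0 1 i n rem)[i.toNat]'(by simpa [length_pvDmg] using hlen) =
      rem[i.toNat] - max 0 d0 := by
  rw [getElem_pvDmg d0 1 i n rem i.toNat hlen]
  have h1 : ((i.toNat : Int)) = i := Int.toNat_of_nonneg h0
  rw [if_pos ⟨le_of_eq h1.symm, by omega⟩, h1]
  ring_nf

theorem need_bracket {d0 r : Int} (hd0 : 0 < d0) :
    (-PySem.Int.floordiv (-r) d0 - 1) * d0 < r ∧ r ≤ (-PySem.Int.floordiv (-r) d0) * d0 :=
  (PySem.Int.neg_floordiv_neg_eq_iff_of_pos hd0).mp rfl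

theorem need_one {d0 r : Int} (hd0 : 0 < d0) (hr : 0 < r) (h : r ≤ d0) :
    -PySem.Int.floordiv (-r) d0 = 1 := by
  exact (PySem.Int.neg_floordiv_neg_eq_iff_of_pos hd0).mpr ⟨by linarith, by linarith⟩

theorem need_two {d0 r : Int} (hd0 : 0 < d0) (h : d0 < r) : 2 ≤ -PySem.Int.floordiv (-r) d0 := by
  obtain ⟨h1, h2⟩ := need_bracket (r := r) hd0
  nlinarith

theorem need_sub {d0 r : Int} (hd0 : 0 < d0) (h : d0 < r) :
    -PySem.Int.floordiv (-(r - d0)) d0 = -PySem.Int.floordiv (-r) d0 - 1 := by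
  obtain ⟨h1, h2⟩ := need_bracket (r := r) hd0
  exact (PySem.Int.neg_floordiv_neg_eq_iff_of_pos hd0).mpr ⟨by nlinarith, by nlinarith⟩

theorem need_pos {d0 r : Int} (hd0 : 0 < d0) (hr : 0 < r) : 1 ≤ -PySem.Int.floordiv (-r) d0 := by
  obtain ⟨h1, h2⟩ := need_bracket (r := r) hd0
  nlinarith

theorem batch_step (n k d0 : Int) (rem : List Int) (used i : Int) (h0 : 0 ≤ i) (hin : i < n) (huk : used < k)
    (hd0 : 0 < d0) (hlen : n ≤ ((rem : List Int).length : Int))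
    (hpos : 0 < PySem.List.pyGetD rem i 0) :
    pvBatch n k d0 rem used i =
      if PySem.List.pyGetD (pvDmg d0 1 i n rem) i 0 > 0 then
        pvBatch n k d0 (pvDmg d0 1 i n rem) (used + 1) i
      else
        pvBatch n k d0 (pvDmg d0 1 i n rem) (used + 1) (i + 1) := by
  have hiN : i.toNat < rem.length := by omega
  have hr : PySem.List.pyGetD rem i 0 = rem[i.toNat] := PySem.List.pyGetD_eq_getElem rem 0 h0 (by omega)
  have hr1 : PySem.List.pyGetD (pvDmg d0 1 i n rem) i 0 = rem[i.toNat] - d0 := by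
    rw [PySem.List.pyGetD_eq_getElem _ 0 h0 (by rw [length_pvDmg]; omega),
      pvDmg_getElem_self d0 i n rem h0 hin hiN, max_eq_right hd0.le]
  rw [pvBatch, dif_pos ⟨hin, huk⟩]
  simp only []
  rw [if_neg (not_le.mpr hpos)]
  set N := -PySem.Int.floordiv (-PySem.List.pyGetD rem i 0) d0 with hNdef
  by_cases hkill : PySem.List.pyGetD rem i 0 ≤ d0
  · have hN1 : N = 1 := need_one hd0 hpos hkill
    have hmin : min N (k - used) = 1 := by omega
    rw [hmin, if_neg (by omega : ¬ (1:Int) < N)]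
    rw [if_neg (by rw [hr1]; rw [hr] at hkill; omega : ¬ PySem.List.pyGetD (pvDmg d0 1 i n rem) i 0 > 0)]
  · have hdr : d0 < PySem.List.pyGetD rem i 0 := not_le.mp hkill
    have hN2 : 2 ≤ N := need_two hd0 hdr
    have hpos1 : PySem.List.pyGetD (pvDmg d0 1 i n rem) i 0 > 0 := by
      rw [hr1]; rw [hr] at hdr; omega
    rw [if_pos hpos1]
    by_cases hk2 : used + 1 < k
    · conv_rhs => rw [pvBatch]
      rw [dif_pos ⟨hin, hk2⟩]
      simp only []
      rw [if_neg (not_le.mpr hpos1)]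
      have hNs : -PySem.Int.floordiv (-PySem.List.pyGetD (pvDmg d0 1 i n rem) i 0) d0 = N - 1 := by
        rw [hr1, hNdef, hr]
        rw [hr] at hdr
        exact need_sub hd0 hdr
      rw [hNs]
      set a' := min (N - 1) (k - (used + 1)) with ha'
      have haa : min N (k - used) = a' + 1 := by omega
      rw [haa, (pvDmg_comp d0 a' i n rem).symm]
      by_cases hlt : a' + 1 < N
      · rw [if_pos hlt, if_pos (by omega : a' < N - 1)]
      · rw [if_neg hlt, if_neg (by omega : ¬ a' < N - 1)]
        have huse : used + (a' + 1) = used + 1 + a' := by ring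
        rw [huse]
    · conv_rhs => rw [pvBatch]
      rw [dif_neg (by omega : ¬ (i < n ∧ used + 1 < k))]
      have hmin : min N (k - used) = 1 := by omega
      rw [hmin, if_pos (by omega : (1:Int) < N)]

theorem loopA_eq_batch (n m k x : Int) (hd0 : 0 < m * x) :
    ∀ (c : Nat) (rem : List Int) (used i : Int), ((n - i) + (k - used)).toNat ≤ c → 0 ≤ i →
      n ≤ (rem.length : Int) → pvLoopA n m k x rem used i = pvBatch n k (m * x) rem used i := by
  intro c
  induction c with
  | zero =>
    intro rem used i hc h0 hlen
    rw [pvLoopA, pvBatch, dif_neg (by omega), dif_neg (by omega)]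
  | succ c ih =>
    intro rem used i hc h0 hlen
    by_cases hg : i < n ∧ used < k
    · by_cases hskip : PySem.List.pyGetD rem i 0 ≤ 0
      · rw [pvLoopA, pvBatch, dif_pos hg, dif_pos hg]
        simp only []
        rw [if_pos hskip, if_pos hskip]
        exact ih rem used (i + 1) (by omega) (by omega) hlen
      · rw [pvLoopA, dif_pos hg]
        simp only []
        rw [if_neg hskip, pvDamageA_eq m x i n rem h0 hlen,
          batch_step n k (m * x) rem used i h0 hg.1 hg.2 hd0 hlen (not_le.mp hskip)]
        have hlen' : n ≤ ((pvDmg (m * x) 1 i n rem).length : Int) := by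
          rw [length_pvDmg]; exact hlen
        by_cases hcond : PySem.List.pyGetD (pvDmg (m * x) 1 i n rem) i 0 > 0
        · rw [if_pos hcond, if_pos hcond]
          have he : i - 1 + 1 = i := by omega
          rw [he]
          exact ih (pvDmg (m * x) 1 i n rem) (used + 1) i (by omega) h0 hlen'
        · rw [if_neg hcond, if_neg hcond]
          exact ih (pvDmg (m * x) 1 i n rem) (used + 1) (i + 1) (by omega) (by omega) hlen'
    · rw [pvLoopA, pvBatch, dif_neg hg, dif_neg hg]

theorem loopA_const (n m k x : Int) (hd0 : m * x ≤ 0) :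
    ∀ (c : Nat) (rem : List Int) (used i : Int), ((n - i) + (k - used)).toNat ≤ c → 0 ≤ i →
      n ≤ (rem.length : Int) → pvLoopA n m k x rem used i = rem := by
  intro c
  induction c with
  | zero =>
    intro rem used i hc h0 hlen
    rw [pvLoopA]
    rw [dif_neg (by omega)]
  | succ c ih =>
    intro rem used i hc h0 hlen
    by_cases hg : i < n ∧ used < k
    · rw [pvLoopA, dif_pos hg]
      simp only []
      split
      · exact ih rem used (i + 1) (by omega) (by omega) hlen
      · rw [pvDamageA_eq m x i n rem h0 hlen, pvDmg_nonpos _ _ _ _ _ hd0]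
        split <;>
        · first
          | (have he : i - 1 + 1 = i := by omega
             rw [he]
             exact ih rem (used + 1) i (by omega) h0 hlen)
          | exact ih rem (used + 1) (i + 1) (by omega) (by omega) hlen
    · rw [pvLoopA, dif_neg hg]

-- ===== B-side lemmas =====

theorem pvHpAt_append (d0 j base : Int) (shots : List (Int × Int)) (p a : Int) :
    pvHpAt d0 j base (shots ++ [(p, a)]) =
      pvHpAt d0 j base shots - a * max 0 (d0 - (j - p) * (j - p)) := by
  simp [pvHpAt, List.foldl_append]

-- effective hp of target t as B computes it
def pvEff (n d0 : Int) (hp : List Int) (shots : List (Int × Int)) (t : Nat) : Int :=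
  if (t : Int) < n then pvHpAt d0 (t : Int) (hp.getD t 0) shots else hp.getD t 0

theorem bool_eq_of_iff {a b : Bool} (h : a = true ↔ b = true) : a = b := by
  cases a <;> cases b <;> simp_all

theorem all_nonpos_iff (l : List Int) :
    (l.all (fun h => decide (h ≤ 0)) = true) ↔ ∀ t : Nat, t < l.length → l.getD t 0 ≤ 0 := by
  rw [List.all_eq_true]
  constructor
  · intro h t ht
    rw [List.getD_eq_getElem _ _ ht]
    exact of_decide_eq_true (h _ (List.getElem_mem ht))
  · intro h x hx
    obtain ⟨t, ht, rfl⟩ := List.mem_iff_getElem.mp hx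
    exact decide_eq_true (by rw [← List.getD_eq_getElem l 0 ht]; exact h t ht)

theorem pvEff_nil (n d0 : Int) (hp : List Int) (t : Nat) :
    pvEff n d0 hp [] t = hp.getD t 0 := by
  rw [pvEff]; split <;> rfl

theorem shotLoop_stuck (n d0 k : Int) (hp : List Int) :
    ∀ (c : Nat) (shots : List (Int × Int)) (used : Int) (j : Nat),
      hp.length - j ≤ c → (d0 ≤ 0 ∨ k ≤ used ∨ n ≤ (j : Int)) →
      (pvShotLoop n d0 k hp shots used j = true ↔
        ∀ t : Nat, j ≤ t → t < hp.length → pvEff n d0 hp shots t ≤ 0) := by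
  intro c
  induction c with
  | zero =>
    intro shots used j hc hstuck
    rw [pvShotLoop, dif_neg (by omega)]
    constructor
    · intro _ t ht htl; omega
    · intro _; rfl
  | succ c ih =>
    intro shots used j hc hstuck
    by_cases hj : j < hp.length
    · rw [pvShotLoop, dif_pos hj]
      simp only []
      have hget : hp[j] = hp.getD j 0 := (List.getD_eq_getElem hp 0 hj).symm
      have heq : pvEff n d0 hp shots j
          = (if (j : Int) < n then pvHpAt d0 (j : Int) hp[j] shots else hp[j]) := by
        simp only [pvEff, hget]
      by_cases hle : (if (j : Int) < n then pvHpAt d0 (j : Int) hp[j] shots else hp[j]) ≤ 0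
      · rw [if_pos hle]
        have hstuck' : d0 ≤ 0 ∨ k ≤ used ∨ n ≤ ((j + 1 : Nat) : Int) := by
          rcases hstuck with h | h | h
          · exact Or.inl h
          · exact Or.inr (Or.inl h)
          · refine Or.inr (Or.inr ?_); push_cast; push_cast at h; omega
        rw [ih shots used (j + 1) (by omega) hstuck']
        constructor
        · intro h t ht htl
          rcases Nat.lt_or_ge j t with hlt | hge
          · exact h t (by omega) htl
          · have : t = j := by omega
            subst this
            rw [heq]; exact hle
        · intro h t ht htl
          exact h t (by omega) htl
      · rw [if_neg hle]
        have heffpos : 0 < pvEff n d0 hp shots j := by rw [heq]; omega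
        by_cases hbr : n ≤ (j : Int) ∨ d0 ≤ 0
        · rw [if_pos hbr]
          constructor
          · intro h; cases h
          · intro h
            have := h j le_rfl hj
            omega
        · rw [if_neg hbr]
          push Not at hbr
          have hd0 : 0 < d0 := by omega
          have hku : k ≤ used := by
            rcases hstuck with h | h | h
            · omega
            · exact h
            · omega
          have hpos : 0 < (if (j : Int) < n then pvHpAt d0 (j : Int) hp[j] shots else hp[j]) := by
            omega
          have hneed := need_pos (r := if (j : Int) < n then pvHpAt d0 (j : Int) hp[j] shots else hp[j]) hd0 hpos
          rw [if_pos (by omega)]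
          constructor
          · intro h; cases h
          · intro h
            have := h j le_rfl hj
            omega
    · rw [pvShotLoop, dif_neg hj]
      constructor
      · intro _ t ht htl; omega
      · intro _; rfl

theorem batch_eq_shot (n k d0 : Int) (hp : List Int) (hd0 : 0 < d0) :
    ∀ (c : Nat) (rem : List Int) (shots : List (Int × Int)) (used i : Int) (j : Nat),
      (n - i).toNat ≤ c → (j : Int) = i → rem.length = hp.length →
      (∀ t : Nat, t < hp.length → i ≤ (t : Int) → (t : Int) < n →
        rem.getD t 0 = pvHpAt d0 (t : Int) (hp.getD t 0) shots) →
      (∀ t : Nat, t < hp.length → n ≤ (t : Int) → rem.getD t 0 = hp.getD t 0) →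
      (∀ t : Nat, t < hp.length → (t : Int) < i → rem.getD t 0 ≤ 0) →
      ((pvBatch n k d0 rem used i).all (fun h => decide (h ≤ 0)) = pvShotLoop n d0 k hp shots used j) := by
  intro c
  induction c with
  | zero =>
    intro rem shots used i j hc hij hlen inv1 inv2 inv3
    rw [pvBatch, dif_neg (by omega)]
    apply bool_eq_of_iff
    rw [all_nonpos_iff,
      shotLoop_stuck n d0 k hp (hp.length - j) shots used j le_rfl (Or.inr (Or.inr (by omega)))]
    constructor
    · intro h t htj htl
      rw [pvEff, if_neg (by omega), ← inv2 t htl (by omega)]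
      exact h t (by omega)
    · intro h t htl
      by_cases htj : (t : Int) < i
      · exact inv3 t (by omega) htj
      · have h2 := h t (by omega) (by omega)
        rw [pvEff, if_neg (by omega)] at h2
        rw [inv2 t (by omega) (by omega)]
        exact h2
  | succ c ih =>
    intro rem shots used i j hc hij hlen inv1 inv2 inv3
    by_cases hg : i < n ∧ used < k
    · obtain ⟨hin, huk⟩ := hg
      by_cases hjl : j < hp.length
      · have hi0 : (0 : Int) ≤ i := by omega
        have hgetD : PySem.List.pyGetD rem i 0 = rem.getD j 0 := by
          rw [PySem.List.pyGetD_eq_getElem rem 0 hi0 (by omega),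
            List.getD_eq_getElem _ _ (show j < rem.length by omega)]
          congr 1
          omega
        have hget : hp[j]'hjl = hp.getD j 0 := (List.getD_eq_getElem hp 0 hjl).symm
        have hrj : rem.getD j 0 = pvHpAt d0 (j : Int) (hp.getD j 0) shots :=
          inv1 j hjl (by omega) (by omega)
        have hpj_eq : (if (j : Int) < n then pvHpAt d0 (j : Int) (hp[j]'hjl) shots else hp[j]'hjl)
            = rem.getD j 0 := by
          rw [if_pos (by omega), hget, hrj]
        rw [pvBatch, dif_pos ⟨hin, huk⟩]
        simp only []
        rw [pvShotLoop, dif_pos hjl]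
        simp only []
        by_cases hle : rem.getD j 0 ≤ 0
        · rw [if_pos (by rw [hgetD]; exact hle), if_pos (by rw [hpj_eq]; exact hle)]
          refine ih rem shots used (i + 1) (j + 1) (by omega) (by push_cast; omega) hlen
            (fun t htl ht1 ht2 => inv1 t htl (by omega) ht2)
            inv2
            (fun t htl ht1 => ?_)
          by_cases ht : (t : Int) < i
          · exact inv3 t htl ht
          · have : t = j := by omega
            subst this
            exact hle
        · rw [if_neg (show ¬ (if (j : Int) < n then pvHpAt d0 (j : Int) (hp[j]'hjl) shots else hp[j]'hjl) ≤ 0 by rw [hpj_eq]; exact hle)]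
          rw [if_neg (show ¬ PySem.List.pyGetD rem i 0 ≤ 0 by rw [hgetD]; exact hle)]
          rw [if_neg (show ¬ (n ≤ (j : Int) ∨ d0 ≤ 0) by omega)]
          rw [hgetD, hpj_eq]
          set r := rem.getD j 0 with hr
          set N := -(PySem.Int.floordiv (-r) d0) with hN
          have hbr := need_bracket (r := r) hd0
          have hmaxd : max 0 (d0 - ((j : Int) - i) * ((j : Int) - i)) = d0 := by
            have : (j : Int) - i = 0 := by omega
            rw [this]
            simp [hd0.le]
          by_cases hbudget : k < used + N
          · rw [if_pos hbudget]
            have ha : min N (k - used) = k - used := by omega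
            rw [ha, if_pos (by omega)]
            have hfalse : ¬ ((pvDmg d0 (k - used) i n rem).all (fun h => decide (h ≤ 0)) = true) := by
              rw [all_nonpos_iff]
              intro h
              have h2 := h j (by rw [length_pvDmg]; omega)
              rw [getD_pvDmg _ _ _ _ _ j (by omega), if_pos ⟨by omega, by omega⟩, ← hr, hmaxd] at h2
              have hkd : (k - used) * d0 ≤ (N - 1) * d0 := by
                apply mul_le_mul_of_nonneg_right (by omega) hd0.le
              nlinarith
            cases hall : (pvDmg d0 (k - used) i n rem).all (fun h => decide (h ≤ 0))
            · rfl
            · exact absurd hall hfalse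
          · rw [if_neg hbudget]
            have ha : min N (k - used) = N := by omega
            rw [ha, if_neg (by omega)]
            refine ih (pvDmg d0 N i n rem) (shots ++ [((j : Int), N)]) (used + N) (i + 1) (j + 1)
              (by omega) (by push_cast; omega) (by rw [length_pvDmg]; exact hlen)
              (fun t htl ht1 ht2 => ?_) (fun t htl ht1 => ?_) (fun t htl ht1 => ?_)
            · rw [List.getD_eq_getElem _ _ (show t < (pvDmg d0 N i n rem).length by rw [length_pvDmg]; omega),
                getElem_pvDmg _ _ _ _ _ t (by omega), if_pos ⟨by omega, ht2⟩,
                ← List.getD_eq_getElem rem 0 (show t < rem.length by omega),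
                inv1 t htl (by omega) ht2, pvHpAt_append, hij]
            · rw [List.getD_eq_getElem _ _ (show t < (pvDmg d0 N i n rem).length by rw [length_pvDmg]; omega),
                getElem_pvDmg _ _ _ _ _ t (by omega), if_neg (by omega),
                ← List.getD_eq_getElem rem 0 (show t < rem.length by omega)]
              exact inv2 t htl ht1
            · by_cases ht : (t : Int) < i
              · rw [List.getD_eq_getElem _ _ (show t < (pvDmg d0 N i n rem).length by rw [length_pvDmg]; omega),
                  getElem_pvDmg _ _ _ _ _ t (by omega), if_neg (by omega),
                  ← List.getD_eq_getElem rem 0 (show t < rem.length by omega)]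
                exact inv3 t htl ht
              · rw [show t = j from by omega,
                  List.getD_eq_getElem _ _ (show j < (pvDmg d0 N i n rem).length by rw [length_pvDmg]; omega),
                  getElem_pvDmg _ _ _ _ _ j (by omega), if_pos ⟨by omega, by omega⟩,
                  ← List.getD_eq_getElem rem 0 (show j < rem.length by omega), ← hr, hmaxd]
                have h2 := hbr.2
                rw [← hN] at h2
                omega
      · rw [pvBatch, dif_pos ⟨hin, huk⟩]
        simp only []
        have hge : PySem.List.pyGetD rem i 0 = 0 := by
          rw [← hij, PySem.List.pyGetD_natCast, List.getD_eq_default]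
          omega
        rw [hge, if_pos le_rfl]
        rw [ih rem shots used (i + 1) (j + 1) (by omega) (by push_cast; omega) hlen
          (fun t htl ht1 ht2 => inv1 t htl (by omega) ht2) inv2
          (fun t htl ht1 => inv3 t htl (by omega))]
        rw [pvShotLoop, dif_neg (show ¬ (j + 1) < hp.length by omega)]
        rw [pvShotLoop, dif_neg hjl]
    · rw [pvBatch, dif_neg hg]
      have hstuck : d0 ≤ 0 ∨ k ≤ used ∨ n ≤ (j : Int) := by omega
      apply bool_eq_of_iff
      rw [all_nonpos_iff, shotLoop_stuck n d0 k hp (hp.length - j) shots used j le_rfl hstuck]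
      constructor
      · intro h t htj htl
        rw [pvEff]
        split
        · rw [← inv1 t htl (by omega) ‹_›]
          exact h t (by omega)
        · rw [← inv2 t htl (by omega)]
          exact h t (by omega)
      · intro h t htl
        by_cases htj : (t : Int) < i
        · exact inv3 t (by omega) htj
        · have h2 := h t (by omega) (by omega)
          rw [pvEff] at h2
          split at h2
          · rw [inv1 t (by omega) (by omega) ‹_›]
            exact h2
          · rw [inv2 t (by omega) (by omega)]
            exact h2

theorem check_eq (n m k x : Int) (hp : List Int) (hcase : n ≤ (hp.length : Int) ∨ k ≤ 0) :
    pvCanDestroy n m k x hp = pvFeasB n m k x hp := by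
  unfold pvCanDestroy pvFeasB
  by_cases hk : k ≤ 0
  · rw [pvLoopA, dif_neg (by omega)]
    apply bool_eq_of_iff
    rw [all_nonpos_iff,
      shotLoop_stuck n (m * x) k hp (hp.length - 0) [] 0 0 le_rfl (Or.inr (Or.inl hk))]
    constructor
    · intro h t _ htl
      rw [pvEff_nil]
      exact h t htl
    · intro h t htl
      have h2 := h t (Nat.zero_le t) htl
      rw [pvEff_nil] at h2
      exact h2
  · have hn : n ≤ (hp.length : Int) := by tauto
    by_cases hd : m * x ≤ 0
    · rw [loopA_const n m k x hd ((n - 0) + (k - 0)).toNat hp 0 0 le_rfl le_rfl hn]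
      apply bool_eq_of_iff
      rw [all_nonpos_iff,
        shotLoop_stuck n (m * x) k hp (hp.length - 0) [] 0 0 le_rfl (Or.inl hd)]
      constructor
      · intro h t _ htl
        rw [pvEff_nil]
        exact h t htl
      · intro h t htl
        have h2 := h t (Nat.zero_le t) htl
        rw [pvEff_nil] at h2
        exact h2
    · rw [loopA_eq_batch n m k x (by omega) ((n - 0) + (k - 0)).toNat hp 0 0 le_rfl le_rfl hn]
      exact batch_eq_shot n k (m * x) hp (by omega) (n - 0).toNat hp [] 0 0 0 le_rfl (by simp) rfl
        (fun t htl ht1 ht2 => rfl) (fun t htl ht1 => rfl) (fun t htl ht1 => by omega)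

theorem search_eq (n m k : Int) (hp : List Int) (hcase : n ≤ (hp.length : Int) ∨ k ≤ 0) :
    ∀ (c : Nat) (l r res : Int), (r - l + 1).toNat ≤ c →
      pvSearchA n m k hp l r res = pvSearchB n m k hp l r res := by
  intro c
  induction c with
  | zero =>
    intro l r res hc
    rw [pvSearchA, pvSearchB, dif_neg (by omega : ¬ l ≤ r), dif_neg (by omega : ¬ l ≤ r)]
  | succ c ih =>
    intro l r res hc
    by_cases hlr : l ≤ r
    · rw [pvSearchA, pvSearchB, dif_pos hlr, dif_pos hlr]
      simp only []
      have hmid := PySem.Int.floordiv_two_mid_bounds hlr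
      rw [check_eq n m k (PySem.Int.floordiv (l + r) 2) hp hcase]
      split
      · exact ih l (PySem.Int.floordiv (l + r) 2 - 1) (PySem.Int.floordiv (l + r) 2) (by omega)
      · exact ih (PySem.Int.floordiv (l + r) 2 + 1) r res (by omega)
    · rw [pvSearchA, pvSearchB, dif_neg hlr, dif_neg hlr]

theorem find_min_x_witness :
    Dom_find_min_x pvWitness_find_min_x.1 pvWitness_find_min_x.2.1 pvWitness_find_min_x.2.2.1 pvWitness_find_min_x.2.2.2 ∧
    Pre_find_min_x pvWitness_find_min_x.1 pvWitness_find_min_x.2.1 pvWitness_find_min_x.2.2.1 pvWitness_find_min_x.2.2.2 := by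
  decide

-- ===== VERDICT (by name: the statement is the Claim_ definition above) =====
theorem find_min_x_spec : Claim_equal_find_min_x := by
  intro n m k hp _ hpre
  simp only [Spec_find_min_x, find_min_x, find_min_x_alt]
  rcases hpre.2.2 with h | h | h
  · rw [search_eq n m k hp (Or.inl h) _ 0 _ (-1) (le_refl _)]
  · rw [search_eq n m k hp (Or.inr h) _ 0 _ (-1) (le_refl _)]
  · rw [pvSearchA, pvSearchB, dif_neg (by omega), dif_neg (by omega)]
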